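-- pv_equiv track=rewrite | github.com/JeffreyMFarley/pyTagger | pyTagger/operations/interview.py | _enforceMultiple
-- ===== SOURCE A (Python) =====
-- import collections
--
-- def _enforceMultiple(rows):
--     # Build a dictionary of all old paths
--     olds = collections.defaultdict(list)
--     for row in rows:
--         if row['oldPath']:
--             olds[row['oldPath']].append(row)
--
--     # If an old row entry has multiple matches, all the rows should have
--     # 'multiple' as the status
--     for v in olds.values():
--         if len(v) > 1:
--             for row in v:
--                 row['status'] = 'multiple'
--
--     return rows
-- ===== SOURCE B (Python) =====
-- def _enforceMultiple(rows):
--     # Single online pass: remember the first row seen for each truthy oldPath;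
--     # on any repeat, mark both the remembered first row and the current one.
--     first = {}
--     for row in rows:
--         p = row['oldPath']
--         if not p:
--             continue
--         if p in first:
--             first[p]['status'] = 'multiple'
--             row['status'] = 'multiple'
--         else:
--             first[p] = row
--     return rows
-- ===== Notes on version B (the rewrite author's own statement) =====
-- stated objective: alternative
-- what changed: Replaces A's two staged phases (group rows into dict-of-lists, then a nested loop marking every big group) by a single online pass that remembers only the first row per truthy oldPath and, on each repeat, marks that remembered row and the current row immediately.
import Mathlib
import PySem

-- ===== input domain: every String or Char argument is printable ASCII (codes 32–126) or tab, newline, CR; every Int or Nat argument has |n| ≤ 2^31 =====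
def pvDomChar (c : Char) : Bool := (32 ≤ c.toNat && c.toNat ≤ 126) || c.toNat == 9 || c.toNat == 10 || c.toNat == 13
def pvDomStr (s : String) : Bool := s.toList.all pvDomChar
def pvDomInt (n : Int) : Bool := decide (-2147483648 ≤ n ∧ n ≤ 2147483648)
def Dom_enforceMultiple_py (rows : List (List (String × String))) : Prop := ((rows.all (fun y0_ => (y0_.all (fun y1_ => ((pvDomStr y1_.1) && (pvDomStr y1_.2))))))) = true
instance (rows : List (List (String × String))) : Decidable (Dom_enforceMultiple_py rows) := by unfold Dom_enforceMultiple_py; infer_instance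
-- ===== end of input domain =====

-- B replaces A's staged grouping+marking phases by one online pass that remembers the first row
-- per truthy oldPath and marks both rows as soon as a repeat is seen (objective: alternative).
-- Both implementations mutate the row dicts in place and return the same list object; the
-- equivalence proved here is about the returned value.


-- row['oldPath']; Pre_ guarantees the key is present, so the default "" is never read
-- (where the key is missing Python raises KeyError — excluded by Pre_).
def pvPath (row : List (String × String)) : String :=
  (PySem.Dict.mk row).getD "oldPath" ""

-- row['status'] = 'multiple'
def pvMark (row : List (String × String)) : List (String × String) :=
  ((PySem.Dict.mk row).insert "status" "multiple").items

-- ===== PORT A =====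
-- first loop of A: olds = defaultdict(list) grouping rows by oldPath; Lean rows are immutable
-- values, so the grouped "row objects" are represented by their positions (zipIdx indices)
-- and the in-place mutation row['status']='multiple' by List.modify at those positions.
def pvOlds (rows : List (List (String × String))) : PySem.Dict String (List Nat) :=
  rows.zipIdx.foldl
    (fun d q => if pvPath q.1 ≠ "" then d.modify (pvPath q.1) [] (· ++ [q.2]) else d)
    PySem.Dict.empty

def enforceMultiple_py (rows : List (List (String × String))) : List (List (String × String)) :=
  (pvOlds rows).values.foldl
    (fun acc v => if 1 < v.length then v.foldl (fun acc2 i => acc2.modify i pvMark) acc else acc)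
    rows

-- ===== PORT B =====
-- the loop body of B; the mutable state is (the current rows, first : dict path -> position of
-- the remembered first row). Python's `first[p]` holds the row OBJECT; here the row's position.
-- `row['oldPath']` is read off the row as the loop reached it: marking never touches 'oldPath'
-- and the current row is first mutated at its own step, so q.1's value is the live one.
def pvStep (s : List (List (String × String)) × PySem.Dict String Nat)
    (q : List (String × String) × Nat) :
    List (List (String × String)) × PySem.Dict String Nat :=
  let p := pvPath q.1
  if p = "" then s
  else
    match s.2.get? p with
    | some j => ((s.1.modify j pvMark).modify q.2 pvMark, s.2)
    | none => (s.1, s.2.insert p q.2)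

def enforceMultiple_py_alt (rows : List (List (String × String))) : List (List (String × String)) :=
  (rows.zipIdx.foldl pvStep (rows, PySem.Dict.empty)).1

-- ===== PRECONDITION & SPEC =====
-- A evaluates row['oldPath'] on every row and raises KeyError where the key is missing;
-- Pre_ admits exactly the inputs where every row carries the key 'oldPath'.
def Pre_enforceMultiple_py (rows : List (List (String × String))) : Prop :=
  (rows.all (fun r => (PySem.Dict.mk r).contains "oldPath")) = true
instance (rows : List (List (String × String))) : Decidable (Pre_enforceMultiple_py rows) := by unfold Pre_enforceMultiple_py; infer_instance

def pvWitness_enforceMultiple_py : (List (List (String × String))) :=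
  [[("oldPath", "a"), ("status", "x")], [("oldPath", "a")], [("oldPath", "")]]

def Spec_enforceMultiple_py (rows : List (List (String × String))) (out : List (List (String × String))) : Prop := out = enforceMultiple_py_alt rows
instance (rows : List (List (String × String))) (out : List (List (String × String))) : Decidable (Spec_enforceMultiple_py rows out) := by unfold Spec_enforceMultiple_py; infer_instance

-- ===== CLAIM (what is proved, stated in full; the proofs are below) =====
def Claim_equal_enforceMultiple_py : Prop := ∀ (rows : List (List (String × String))), Dom_enforceMultiple_py rows → Pre_enforceMultiple_py rows → Spec_enforceMultiple_py rows (enforceMultiple_py rows)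

-- ===== LEMMAS AND PROOFS =====

theorem pvMark_idem (row : List (String × String)) : pvMark (pvMark row) = pvMark row := by
  show (((PySem.Dict.mk row).insert "status" "multiple").insert "status" "multiple").items
      = ((PySem.Dict.mk row).insert "status" "multiple").items
  rw [PySem.Dict.insert_insert_self]

theorem foldl_modify_length {α : Type} (f : α → α) (L : List Nat) (xs : List α) :
    (L.foldl (fun acc i => acc.modify i f) xs).length = xs.length := by
  induction L generalizing xs with
  | nil => rfl
  | cons i L ih => simp [List.foldl_cons, ih, List.length_modify]

theorem foldl_modify_getElem {α : Type} (f : α → α) (hf : ∀ a, f (f a) = f a)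
    (L : List Nat) (xs : List α) (j : Nat) (hj : j < xs.length)
    (h' : j < (L.foldl (fun acc i => acc.modify i f) xs).length) :
    (L.foldl (fun acc i => acc.modify i f) xs)[j] = if j ∈ L then f xs[j] else xs[j] := by
  induction L generalizing xs with
  | nil => simp
  | cons i L ih =>
    have hj' : j < (xs.modify i f).length := by simpa [List.length_modify] using hj
    have h'' : j < (L.foldl (fun acc i => acc.modify i f) (xs.modify i f)).length := by
      simpa [foldl_modify_length, List.length_modify] using hj
    simp only [List.foldl_cons]
    rw [ih (xs.modify i f) hj' h'']
    rw [List.getElem_modify]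
    by_cases hmem : j ∈ L
    · by_cases hij : i = j <;> simp [hmem, hij, hf]
    · by_cases hij : i = j <;> simp [hmem, hij, List.mem_cons, Ne.symm]

-- pass 1 of A: the group of a truthy path p is the list of indices of rows with that path
theorem olds_getD (rows : List (List (String × String))) (p : String) (hp : p ≠ "") :
    (pvOlds rows).getD p [] =
      (rows.zipIdx.filter (fun q => pvPath q.1 == p)).map (fun q => q.2) := by
  unfold pvOlds
  rw [PySem.List.foldl_ite_eq_foldl_filter (p := fun q : (List (String × String)) × Nat => pvPath q.1 ≠ "")]
  have hmap : List.foldl (fun d (q : (List (String × String)) × Nat) => d.modify (pvPath q.1) [] (· ++ [q.2]))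
        PySem.Dict.empty (rows.zipIdx.filter (fun q => decide (pvPath q.1 ≠ "")))
      = List.foldl (fun (d : PySem.Dict String (List Nat)) (y : String × Nat) => d.modify y.1 [] (· ++ [y.2]))
        PySem.Dict.empty
        ((rows.zipIdx.filter (fun q => decide (pvPath q.1 ≠ ""))).map
          (fun (q : (List (String × String)) × Nat) => (pvPath q.1, q.2))) := by
    rw [List.foldl_map]
  rw [hmap, PySem.Dict.getD_foldl_modify_append, PySem.Dict.getD_empty]
  rw [List.filter_map, List.map_map, List.filter_filter]
  simp only [List.nil_append]
  have hfil : ∀ q : (List (String × String)) × Nat,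
      (((fun (y : String × Nat) => y.1 == p) ∘ fun q => (pvPath q.1, q.2)) q
        && decide (pvPath q.1 ≠ "")) = (pvPath q.1 == p) := by
    intro q
    by_cases h : pvPath q.1 = p
    · simp [Function.comp, h, hp]
    · simp [Function.comp, h]
  rw [List.filter_congr (fun q _ => hfil q)]
  rfl

theorem olds_keys (rows : List (List (String × String))) :
    (pvOlds rows).keys =
      PySem.Set.ofList ((rows.zipIdx.filter (fun q => decide (pvPath q.1 ≠ ""))).map (fun q => pvPath q.1)) := by
  unfold pvOlds
  rw [PySem.List.foldl_ite_eq_foldl_filter (p := fun q : (List (String × String)) × Nat => pvPath q.1 ≠ "")]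
  exact (PySem.Dict.keys_foldl_modify_key _
      (fun (q : (List (String × String)) × Nat) => pvPath q.1) []
      (fun _ (q : (List (String × String)) × Nat) => (· ++ [q.2])) PySem.Dict.empty).trans
    (by rw [PySem.Dict.keys_empty, PySem.Set.update_nil_left])

theorem olds_nodup (rows : List (List (String × String))) : (pvOlds rows).keys.Nodup := by
  unfold pvOlds
  rw [PySem.List.foldl_ite_eq_foldl_filter (p := fun q : (List (String × String)) × Nat => pvPath q.1 ≠ "")]
  exact PySem.Dict.nodup_keys_foldl_modify_key _
    (fun (q : (List (String × String)) × Nat) => pvPath q.1) []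
    (fun _ (q : (List (String × String)) × Nat) => (· ++ [q.2])) _ PySem.Dict.nodup_keys_empty

-- the number of rows with a given path, read off a group's length
theorem group_length (rows : List (List (String × String))) (p : String) :
    ((rows.zipIdx.filter (fun q => pvPath q.1 == p)).map (fun q => q.2)).length
      = rows.countP (fun r => pvPath r == p) := by
  rw [List.length_map, ← List.countP_eq_length_filter]
  conv_rhs => rw [← List.zipIdx_map_fst 0 rows]
  rw [List.countP_map]
  rfl

-- membership in the concatenation of the big groups ↔ the path is truthy and occurs twice
theorem mem_big_groups (rows : List (List (String × String))) (j : Nat) (hj : j < rows.length) :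
    (j ∈ ((pvOlds rows).values.filter (fun v => decide (1 < v.length))).flatten)
      ↔ (pvPath rows[j] ≠ "" ∧ 2 ≤ rows.countP (fun r => pvPath r == pvPath rows[j])) := by
  rw [List.mem_flatten]
  constructor
  · rintro ⟨v, hv, hjv⟩
    rw [List.mem_filter] at hv
    obtain ⟨hvv, hvlen⟩ := hv
    rw [PySem.Dict.values_eq_map_keys _ (olds_nodup rows) []] at hvv
    obtain ⟨k, hk, rfl⟩ := List.mem_map.mp hvv
    have hkne : k ≠ "" := by
      rw [olds_keys, PySem.Set.mem_ofList] at hk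
      obtain ⟨q, hq, rfl⟩ := List.mem_map.mp hk
      rw [List.mem_filter] at hq
      simpa using hq.2
    rw [olds_getD rows k hkne] at hjv hvlen
    obtain ⟨q, hq, rfl⟩ := List.mem_map.mp hjv
    rw [List.mem_filter] at hq
    have hrow : rows[q.2]? = some q.1 := List.mem_zipIdx_iff_getElem?.mp hq.1
    have hrow' : rows[q.2] = q.1 := by
      have := List.getElem?_eq_getElem (l := rows) (i := q.2) hj
      rw [this] at hrow; exact (Option.some.injEq _ _).mp hrow
    have hkey : pvPath rows[q.2] = k := by rw [hrow']; exact beq_iff_eq.mp hq.2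
    rw [hkey]
    refine ⟨hkne, ?_⟩
    rw [group_length] at hvlen
    simp only [decide_eq_true_eq] at hvlen
    omega
  · rintro ⟨hne, hcnt⟩
    refine ⟨(pvOlds rows).getD (pvPath rows[j]) [], ?_, ?_⟩
    · rw [List.mem_filter]
      have hq : (rows[j], j) ∈ rows.zipIdx := by
        rw [List.mem_zipIdx_iff_getElem?]
        exact List.getElem?_eq_getElem hj
      constructor
      · rw [PySem.Dict.values_eq_map_keys _ (olds_nodup rows) []]
        apply List.mem_map.mpr
        refine ⟨pvPath rows[j], ?_, rfl⟩
        rw [olds_keys, PySem.Set.mem_ofList]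
        apply List.mem_map.mpr
        refine ⟨(rows[j], j), ?_, rfl⟩
        rw [List.mem_filter]
        exact ⟨hq, by simpa using hne⟩
      · rw [olds_getD rows _ hne, group_length]
        simp only [decide_eq_true_eq]
        omega
    · rw [olds_getD rows _ hne]
      apply List.mem_map.mpr
      refine ⟨(rows[j], j), ?_, rfl⟩
      rw [List.mem_filter]
      refine ⟨?_, by simp⟩
      rw [List.mem_zipIdx_iff_getElem?]
      exact List.getElem?_eq_getElem hj

-- A's second phase is a single marking fold over the concatenation of the big groups
theorem portA_eq (rows : List (List (String × String))) :
    enforceMultiple_py rows =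
      (((pvOlds rows).values.filter (fun v => decide (1 < v.length))).flatten).foldl
        (fun acc i => acc.modify i pvMark) rows := by
  unfold enforceMultiple_py
  rw [List.foldl_flatten]
  rw [PySem.List.foldl_ite_eq_foldl_filter (p := fun v : List Nat => 1 < v.length)]

-- the loop invariant of B's single pass, after the first n rows were processed: every row whose
-- truthy path already occurred twice in the prefix is marked, no other row is touched, and the
-- dictionary sends each key to the position of a prefix row carrying it (none = key unseen).
theorem loop_inv (rows : List (List (String × String))) (n : Nat) (hn : n ≤ rows.length) :
    (((rows.zipIdx.take n).foldl pvStep (rows, PySem.Dict.empty)).1.length = rows.length) ∧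
    (∀ j, (hj : j < rows.length) →
      ((rows.zipIdx.take n).foldl pvStep (rows, PySem.Dict.empty)).1[j]? =
        some (if pvPath rows[j] ≠ "" ∧ j < n ∧
                2 ≤ (rows.take n).countP (fun r => pvPath r == pvPath rows[j])
              then pvMark rows[j] else rows[j])) ∧
    (∀ p j, ((rows.zipIdx.take n).foldl pvStep (rows, PySem.Dict.empty)).2.get? p = some j →
        j < n ∧ ∀ (hj : j < rows.length), pvPath rows[j] = p) ∧
    (∀ p, p ≠ "" → ((rows.zipIdx.take n).foldl pvStep (rows, PySem.Dict.empty)).2.get? p = none →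
        (rows.take n).countP (fun r => pvPath r == p) = 0) := by
  induction n with
  | zero =>
    refine ⟨rfl, ?_, ?_, ?_⟩
    · intro j hj
      simp [List.getElem?_eq_getElem hj]
    · intro p j h
      simp [PySem.Dict.get?_empty] at h
    · intro p _ _
      simp
  | succ n ih =>
    have hn' : n ≤ rows.length := Nat.le_of_succ_le hn
    have hnlt : n < rows.length := hn
    obtain ⟨ih1, ih2, ih3, ih4⟩ := ih hn'
    have hzlen : n < rows.zipIdx.length := by simpa using hnlt
    have hztake : rows.zipIdx.take (n + 1) = rows.zipIdx.take n ++ [(rows[n], n)] := by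
      rw [List.take_add_one, List.getElem?_eq_getElem hzlen]
      simp
    have hrtake : rows.take (n + 1) = rows.take n ++ [rows[n]] := by
      rw [List.take_add_one, List.getElem?_eq_getElem hnlt]
      simp
    rw [hztake, List.foldl_append, List.foldl_cons, List.foldl_nil]
    set s := (rows.zipIdx.take n).foldl pvStep (rows, PySem.Dict.empty) with hs
    by_cases hp0 : pvPath rows[n] = ""
    · -- falsy path: nothing changes
      have hstep : pvStep s (rows[n], n) = s := by
        simp [pvStep, hp0]
      rw [hstep]
      refine ⟨ih1, ?_, ?_, ?_⟩
      · intro j hj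
        rw [ih2 j hj]
        congr 1
        apply if_congr _ rfl rfl
        rw [hrtake, List.countP_append]
        by_cases hpj : pvPath rows[j] = ""
        · simp [hpj]
        · have h0 : (List.countP (fun r => pvPath r == pvPath rows[j]) [rows[n]]) = 0 := by
            simp [List.countP_cons]
            intro h; exact absurd (h ▸ hp0) hpj
          rw [h0, Nat.add_zero]
          simp only [hpj, ne_eq, not_false_iff, true_and]
          constructor
          · rintro ⟨h1, h2⟩; exact ⟨Nat.lt_succ_of_lt h1, h2⟩
          · rintro ⟨h1, h2⟩
            refine ⟨?_, h2⟩
            rcases Nat.lt_succ_iff_lt_or_eq.mp h1 with h | rfl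
            · exact h
            · exact absurd hp0 hpj
      · intro p j h
        obtain ⟨h1, h2⟩ := ih3 p j h
        exact ⟨Nat.lt_succ_of_lt h1, h2⟩
      · intro p hp h
        rw [hrtake, List.countP_append, ih4 p hp h]
        simp [List.countP_cons]
        intro h'; exact absurd (h' ▸ hp0) hp
    · by_cases hfind : s.2.get? (pvPath rows[n]) = none
      · -- first occurrence: insert, rows untouched
        have hstep : pvStep s (rows[n], n) = (s.1, s.2.insert (pvPath rows[n]) n) := by
          simp [pvStep, hp0, hfind]
        rw [hstep]
        have hcnt0 : (rows.take n).countP (fun r => pvPath r == pvPath rows[n]) = 0 :=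
          ih4 _ hp0 hfind
        refine ⟨ih1, ?_, ?_, ?_⟩
        · intro j hj
          rw [ih2 j hj]
          congr 1
          apply if_congr _ rfl rfl
          rw [hrtake, List.countP_append]
          by_cases hpj : pvPath rows[j] = ""
          · simp [hpj]
          · simp only [hpj, ne_eq, not_false_iff, true_and]
            by_cases heq : pvPath rows[j] = pvPath rows[n]
            · -- count in prefix was 0, stays ≤ 1: both sides false
              have hone : List.countP (fun r => pvPath r == pvPath rows[n]) [rows[n]] = 1 := by
                simp
              rw [heq, hcnt0, hone]
              constructor
              · rintro ⟨_, h2⟩; omega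
              · rintro ⟨_, h2⟩; omega
            · have h0 : List.countP (fun r => pvPath r == pvPath rows[j]) [rows[n]] = 0 := by
                simp [List.countP_cons]
                intro h; exact absurd h.symm heq
              rw [h0, Nat.add_zero]
              constructor
              · rintro ⟨h1, h2⟩; exact ⟨Nat.lt_succ_of_lt h1, h2⟩
              · rintro ⟨h1, h2⟩
                refine ⟨?_, h2⟩
                rcases Nat.lt_succ_iff_lt_or_eq.mp h1 with h | rfl
                · exact h
                · rw [hcnt0] at h2; omega
        · intro p j h
          rw [PySem.Dict.get?_insert] at h
          split at h
          · rename_i hpp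
            cases h
            subst hpp
            exact ⟨Nat.lt_succ_self n, fun _ => rfl⟩
          · obtain ⟨h1, h2⟩ := ih3 p j h
            exact ⟨Nat.lt_succ_of_lt h1, h2⟩
        · intro p hp h
          rw [PySem.Dict.get?_insert] at h
          split at h
          · cases h
          · rename_i hpp
            rw [hrtake, List.countP_append, ih4 p hp h]
            simp [List.countP_cons]
            intro h'; exact absurd h'.symm hpp
      · -- repeat: mark the remembered first row j0 and the current row n
        obtain ⟨j0, hj0⟩ := Option.ne_none_iff_exists'.mp hfind
        have hstep : pvStep s (rows[n], n) = ((s.1.modify j0 pvMark).modify n pvMark, s.2) := by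
          simp [pvStep, hp0, hj0]
        rw [hstep]
        obtain ⟨hj0n, hj0p⟩ := ih3 _ _ hj0
        have hj0len : j0 < rows.length := Nat.lt_of_lt_of_le hj0n hn'
        have hj0path : pvPath rows[j0] = pvPath rows[n] := hj0p hj0len
        have hone : List.countP (fun r => pvPath r == pvPath rows[n]) [rows[n]] = 1 := by
          simp
        have hcnt1 : 1 ≤ (rows.take n).countP (fun r => pvPath r == pvPath rows[n]) := by
          rw [List.countP_eq_length_filter]
          have hmem : rows[j0] ∈ (rows.take n).filter (fun r => pvPath r == pvPath rows[n]) := by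
            rw [List.mem_filter]
            refine ⟨?_, by simp [hj0path]⟩
            exact List.mem_take_iff_getElem.mpr ⟨j0, by omega, by simp⟩
          exact List.length_pos_of_mem hmem
        refine ⟨by simpa [List.length_modify] using ih1, ?_, ?_, ?_⟩
        · intro j hj
          have hjlt1 : j < s.1.length := by rw [ih1]; exact hj
          rw [List.getElem?_modify, List.getElem?_modify, ih2 j hj]
          simp only [Option.map_eq_map, Option.map_some]
          by_cases hjn : n = j
          · subst hjn
            have hcond : ¬ (pvPath rows[n] ≠ "" ∧ n < n ∧
                2 ≤ (rows.take n).countP (fun r => pvPath r == pvPath rows[n])) := by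
              rintro ⟨_, h, _⟩; omega
            have hnew : (pvPath rows[n] ≠ "" ∧ n < n + 1 ∧
                2 ≤ (rows.take (n+1)).countP (fun r => pvPath r == pvPath rows[n])) := by
              rw [hrtake, List.countP_append, hone]
              exact ⟨hp0, Nat.lt_succ_self n, by omega⟩
            rw [if_neg hcond, if_pos hnew, if_pos rfl]
            by_cases hj0eq : j0 = n
            · omega
            · rw [if_neg hj0eq]
          · rw [if_neg hjn]
            by_cases hj0eq : j0 = j
            · subst hj0eq
              have hnew : (pvPath rows[j0] ≠ "" ∧ j0 < n + 1 ∧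
                  2 ≤ (rows.take (n+1)).countP (fun r => pvPath r == pvPath rows[j0])) := by
                rw [hj0path, hrtake, List.countP_append, hone]
                exact ⟨hj0path ▸ hp0, by omega, by omega⟩
              rw [if_pos hnew, if_pos rfl]
              congr 1
              by_cases hold : (pvPath rows[j0] ≠ "" ∧ j0 < n ∧
                  2 ≤ (rows.take n).countP (fun r => pvPath r == pvPath rows[j0]))
              · rw [if_pos hold, pvMark_idem]
              · rw [if_neg hold]
            · rw [if_neg hj0eq]
              congr 1
              apply if_congr _ rfl rfl
              rw [hrtake, List.countP_append]
              by_cases hpj : pvPath rows[j] = ""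
              · simp [hpj]
              · simp only [hpj, ne_eq, not_false_iff, true_and]
                by_cases heq : pvPath rows[j] = pvPath rows[n]
                · -- j also carries the path; j ≠ j0, j ≠ n:
                  -- if j < n then take n already holds both j and j0, count ≥ 2 on both sides;
                  -- otherwise j > n and both sides are false.
                  rw [heq, hone]
                  by_cases hjlt : j < n
                  · have h2 : 2 ≤ (rows.take n).countP (fun r => pvPath r == pvPath rows[n]) := by
                      have hnd : (rows.take n).zipIdx.Nodup := by
                        apply List.Nodup.of_map (f := fun q : (List (String × String)) × Nat => q.2)
                        rw [List.zipIdx_map_snd]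
                        exact List.nodup_range'
                      have hmj : ((rows.take n)[j]'(by simp; omega), j) ∈
                          (rows.take n).zipIdx.filter (fun q => pvPath q.1 == pvPath rows[n]) := by
                        rw [List.mem_filter]
                        refine ⟨?_, ?_⟩
                        · rw [List.mem_zipIdx_iff_getElem?]
                          exact List.getElem?_eq_getElem _
                        · simp only [List.getElem_take]
                          simp [heq]
                      have hmj0 : ((rows.take n)[j0]'(by simp; omega), j0) ∈
                          (rows.take n).zipIdx.filter (fun q => pvPath q.1 == pvPath rows[n]) := by
                        rw [List.mem_filter]
                        refine ⟨?_, ?_⟩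
                        · rw [List.mem_zipIdx_iff_getElem?]
                          exact List.getElem?_eq_getElem _
                        · simp only [List.getElem_take]
                          simp [hj0path]
                      have hne2 : ((rows.take n)[j]'(by simp; omega), j)
                          ≠ ((rows.take n)[j0]'(by simp; omega), j0) := by
                        intro hcon
                        exact hj0eq (by injection hcon with _ h; omega)
                      have hglen : 2 ≤ ((rows.take n).zipIdx.filter
                          (fun q => pvPath q.1 == pvPath rows[n])).length := by
                        have hsub : [((rows.take n)[j]'(by simp; omega), j),
                            ((rows.take n)[j0]'(by simp; omega), j0)].Subset
                            ((rows.take n).zipIdx.filter (fun q => pvPath q.1 == pvPath rows[n])) := by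
                          intro x hx
                          simp only [List.mem_cons, List.not_mem_nil, or_false] at hx
                          rcases hx with rfl | rfl
                          · exact hmj
                          · exact hmj0
                        have hnd2 : [((rows.take n)[j]'(by simp; omega), j),
                            ((rows.take n)[j0]'(by simp; omega), j0)].Nodup := by
                          refine List.nodup_cons.mpr ⟨?_, List.nodup_singleton _⟩
                          simp only [List.mem_singleton]
                          exact hne2
                        simpa using (List.subperm_of_subset hnd2 hsub).length_le
                      have hcc : ((rows.take n).zipIdx.filter
                          (fun q => pvPath q.1 == pvPath rows[n])).length
                          = (rows.take n).countP (fun r => pvPath r == pvPath rows[n]) := by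
                        rw [← List.countP_eq_length_filter]
                        conv_rhs => rw [← List.zipIdx_map_fst 0 (rows.take n)]
                        rw [List.countP_map]
                        rfl
                      omega
                    constructor
                    · rintro ⟨_, h⟩; exact ⟨by omega, by omega⟩
                    · rintro _; exact ⟨hjlt, h2⟩
                  · constructor
                    · rintro ⟨h, _⟩; omega
                    · rintro ⟨h, _⟩
                      exfalso
                      rcases Nat.lt_succ_iff_lt_or_eq.mp h with h' | rfl
                      · omega
                      · exact hjn rfl
                · have h0 : List.countP (fun r => pvPath r == pvPath rows[j]) [rows[n]] = 0 := by
                    simp [List.countP_cons]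
                    intro h; exact absurd h.symm heq
                  rw [h0, Nat.add_zero]
                  constructor
                  · rintro ⟨h1, h2⟩; exact ⟨Nat.lt_succ_of_lt h1, h2⟩
                  · rintro ⟨h1, h2⟩
                    refine ⟨?_, h2⟩
                    rcases Nat.lt_succ_iff_lt_or_eq.mp h1 with h | rfl
                    · exact h
                    · exact absurd rfl hjn
        · intro p j h
          obtain ⟨h1, h2⟩ := ih3 p j h
          exact ⟨Nat.lt_succ_of_lt h1, h2⟩
        · intro p hp h
          rw [hrtake, List.countP_append, ih4 p hp h]
          simp [List.countP_cons]
          intro h'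
          subst h'
          rw [hj0] at h
          cases h

-- ===== VERDICT (by name: the statement is the Claim_ definition above) =====
theorem enforceMultiple_py_spec : Claim_equal_enforceMultiple_py := by
  intro rows _ _
  unfold Spec_enforceMultiple_py
  rw [portA_eq]
  unfold enforceMultiple_py_alt
  obtain ⟨h1, h2, _, _⟩ := loop_inv rows rows.length (le_refl _)
  rw [List.take_of_length_le (le_of_eq (by simp))] at h1 h2
  apply List.ext_getElem?
  intro j
  by_cases hj : j < rows.length
  · have hAj : j < (((pvOlds rows).values.filter (fun v => decide (1 < v.length))).flatten.foldl
        (fun acc i => acc.modify i pvMark) rows).length := by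
      rw [foldl_modify_length]; exact hj
    rw [List.getElem?_eq_getElem hAj, h2 j hj]
    rw [foldl_modify_getElem pvMark pvMark_idem _ rows j hj hAj]
    congr 1
    apply if_congr _ rfl rfl
    rw [mem_big_groups rows j hj, List.take_length]
    constructor
    · rintro ⟨a, b⟩; exact ⟨a, hj, b⟩
    · rintro ⟨a, _, b⟩; exact ⟨a, b⟩
  · have hA : (((pvOlds rows).values.filter (fun v => decide (1 < v.length))).flatten.foldl
        (fun acc i => acc.modify i pvMark) rows).length ≤ j := by
      rw [foldl_modify_length]; omega
    have hB : ((rows.zipIdx.foldl pvStep (rows, PySem.Dict.empty)).1).length ≤ j := by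
      omega
    rw [List.getElem?_eq_none hA, List.getElem?_eq_none hB]
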